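-- pv_equiv track=rewrite | github.com/FerdmanAriel/computer_science | hw1_209224120.py | kth_order
-- ===== SOURCE A (Python) =====
-- def kth_order(text, k):
--
--     dictionary = {}
--
--     for i in range(len(text)):
--         if text[i] in dictionary.keys():
--             dictionary[text[i]] += 1
--         else:
--             dictionary[text[i]] = 1
--
--     dictionary = sorted(dictionary.items(), reverse=True, key=lambda x: x[1])
--
--     return dictionary[k-1][0]
-- ===== SOURCE B (Python) =====
-- def kth_order(text, k):
--     freq = {}
--     for c in text:
--         freq[c] = freq.get(c, 0) + 1
--     buckets = {}
--     for ch, cnt in freq.items():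
--         buckets[cnt] = buckets.get(cnt, []) + [ch]
--     result = []
--     for cnt in range(len(text), 0, -1):
--         result.extend(buckets.get(cnt, []))
--     return result[k - 1]
-- ===== Notes on version B (the rewrite author's own statement) =====
-- stated objective: alternative
-- what changed: Replaces the stable reverse sort of the frequency items by counting-sort style buckets: characters are grouped by their count and emitted by a descending sweep over possible counts, preserving first-occurrence tie order; the k-th element is read off the bucket concatenation.
import Mathlib
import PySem

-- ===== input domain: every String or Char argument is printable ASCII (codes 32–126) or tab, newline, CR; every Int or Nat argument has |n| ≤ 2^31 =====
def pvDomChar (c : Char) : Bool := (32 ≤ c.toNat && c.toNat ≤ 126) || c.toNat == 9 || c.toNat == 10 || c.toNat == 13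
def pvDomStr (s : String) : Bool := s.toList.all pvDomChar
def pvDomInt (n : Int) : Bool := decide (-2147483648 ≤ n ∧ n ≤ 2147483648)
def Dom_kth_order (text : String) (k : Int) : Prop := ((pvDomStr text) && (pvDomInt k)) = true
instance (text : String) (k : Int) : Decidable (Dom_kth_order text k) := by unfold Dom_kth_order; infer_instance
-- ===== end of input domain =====

-- B replaces A's stable reverse sort of the frequency items by count-buckets swept in
-- descending count order (same value everywhere Python A returns; A's IndexError inputs excluded by Pre_).

-- ===== PORT A =====
-- literal port of A: build the frequency dict by indexing text over range(len(text)),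
-- stable-sort the items by count descending, return item [k-1]'s character.
def kth_order (text : String) (k : Int) : String :=
  let cs := text.toList
  let dictionary : PySem.Dict Char Int :=
    (PySem.List.pyRange 0 (PySem.List.len cs) 1).foldl (fun d i =>
      match PySem.List.pyGet? cs i with
      | none => d   -- unreachable: i ∈ range(len(text))
      | some c => if d.contains c then d.modify c 0 (· + 1) else d.insert c 1)
      PySem.Dict.empty
  let sortedItems := PySem.List.sorted dictionary.items (fun p => p.2) true
  match PySem.List.pyGet? sortedItems (k - 1) with
  | some p => String.ofList [p.1]
  | none => ""   -- IndexError in Python; excluded by Pre_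

-- ===== PORT B =====
def kth_order_alt (text : String) (k : Int) : String :=
  let cs := text.toList
  let freq : PySem.Dict Char Int :=
    cs.foldl (fun d c => d.modify c 0 (· + 1)) PySem.Dict.empty
  let buckets : PySem.Dict Int (List Char) :=
    freq.items.foldl (fun b p => b.modify p.2 [] (· ++ [p.1])) PySem.Dict.empty
  let result : List Char :=
    (PySem.List.pyRange (PySem.List.len cs) 0 (-1)).foldl
      (fun acc cnt => acc ++ buckets.getD cnt []) []
  match PySem.List.pyGet? result (k - 1) with
  | some c => String.ofList [c]
  | none => ""   -- IndexError in Python; excluded by Pre_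

-- ===== PRECONDITION & SPEC =====
-- Python A raises IndexError unless k-1 is a valid (possibly negative) index into the
-- list of distinct characters; exactly those inputs are admitted.
def Pre_kth_order (text : String) (k : Int) : Prop :=
  -((PySem.List.dedup text.toList).length : Int) ≤ k - 1 ∧
    k - 1 < ((PySem.List.dedup text.toList).length : Int)
instance (text : String) (k : Int) : Decidable (Pre_kth_order text k) := by
  unfold Pre_kth_order; infer_instance
def pvWitness_kth_order : String × Int := ("aab", 1)
def Spec_kth_order (text : String) (k : Int) (out : String) : Prop := out = kth_order_alt text k
instance (text : String) (k : Int) (out : String) : Decidable (Spec_kth_order text k out) := by unfold Spec_kth_order; infer_instance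

-- ===== CLAIM (what is proved, stated in full; the proofs are below) =====
def Claim_equal_kth_order : Prop := ∀ (text : String) (k : Int), Dom_kth_order text k → Pre_kth_order text k → Spec_kth_order text k (kth_order text k)


-- ===== LEMMAS AND PROOFS =====

-- A's "if c in dict: dict[c] += 1 else: dict[c] = 1" body is exactly d[c] = d.get(c,0)+1
lemma stepA_eq_modify (d : PySem.Dict Char Int) (c : Char) :
    (if d.contains c then d.modify c 0 (· + 1) else d.insert c 1) = d.modify c 0 (· + 1) := by
  split_ifs with h
  · rfl
  · simp [PySem.Dict.modify,
      PySem.Dict.getD_of_not_contains _ _ (by simpa using h)]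

-- A's index loop over range(len(text)) builds Counter(text)
lemma A_dict_eq_counter (cs : List Char) :
    (PySem.List.pyRange 0 (PySem.List.len cs) 1).foldl (fun d i =>
      match PySem.List.pyGet? cs i with
      | none => d
      | some c => if d.contains c then d.modify c 0 (· + 1) else d.insert c 1)
      (PySem.Dict.empty : PySem.Dict Char Int) = PySem.Dict.counter cs := by
  rw [PySem.List.foldl_congr_mem _ _
      (fun d i => d.modify (PySem.List.pyGetD cs i ' ') 0 (· + 1)) _ ?_]
  · simpa [PySem.Dict.counter] using
      PySem.List.foldl_pyRange_pyGetD cs ' ' (fun d c => d.modify c 0 (· + 1))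
        (PySem.Dict.empty : PySem.Dict Char Int) (le_refl 0)
  · intro d i hi
    obtain ⟨h0, h1⟩ := PySem.List.mem_pyRange_one.mp hi
    obtain ⟨m, rfl⟩ : ∃ m : Nat, i = (m : Int) := ⟨i.toNat, by omega⟩
    have hm : m < cs.length := by
      have : (m : Int) < (cs.length : Int) := by simpa [PySem.List.len] using h1
      exact_mod_cast this
    show (match PySem.List.pyGet? cs ((m : Nat) : Int) with
      | none => d
      | some c => if d.contains c then d.modify c 0 (· + 1) else d.insert c 1)
      = d.modify (PySem.List.pyGetD cs ((m : Nat) : Int) ' ') 0 (· + 1)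
    rw [PySem.List.pyGet?_natCast, List.getElem?_eq_getElem hm, PySem.List.pyGetD_natCast]
    simp only [List.getD_eq_getElem?_getD, List.getElem?_eq_getElem hm, Option.getD_some]
    exact stepA_eq_modify d cs[m]

-- inserting past a prefix none of which x goes before
lemma insertBy_append_of_not_before {α : Type} (before : α → α → Bool) (x : α)
    (l1 l2 : List α) (h : ∀ y ∈ l1, before x y = false) :
    PySem.List.insertBy before x (l1 ++ l2) = l1 ++ PySem.List.insertBy before x l2 := by
  induction l1 with
  | nil => simp
  | cons a t ih =>
    have ha : before x a = false := h a (by simp)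
    simp [PySem.List.insertBy, ha, ih (fun y hy => h y (by simp [hy]))]

-- inserting in front of a list x goes before all of
lemma insertBy_of_forall_before {α : Type} (before : α → α → Bool) (x : α) (l : List α)
    (h : ∀ y ∈ l, before x y = true) :
    PySem.List.insertBy before x l = x :: l := by
  cases l with
  | nil => simp [PySem.List.insertBy]
  | cons a t => simp [PySem.List.insertBy, h a (by simp)]

-- inserting x into a bucket concatenation appends it to the end of its own bucket
lemma insertBy_flatMap_filter {α : Type} (key : α → Int) (x : α) (ys : List α) :
    ∀ (cs : List Int), cs.Pairwise (fun a b => b < a) → key x ∈ cs →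
    PySem.List.insertBy (fun a b => decide (key b < key a)) x
        (cs.flatMap (fun c => ys.filter (fun y => key y == c)))
      = cs.flatMap (fun c => (ys ++ [x]).filter (fun y => key y == c)) := by
  intro cs
  induction cs with
  | nil => intro _ hm; simp at hm
  | cons c cs' ih =>
    intro hp hm
    have hlt : ∀ b ∈ cs', b < c := (List.pairwise_cons.mp hp).1
    have hp' : cs'.Pairwise (fun a b => b < a) := (List.pairwise_cons.mp hp).2
    have hmemkey : ∀ y ∈ cs'.flatMap (fun c' => ys.filter (fun z => key z == c')), key y < c := by
      intro y hy
      rcases List.mem_flatMap.mp hy with ⟨c', hc', hyf⟩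
      have hk : key y = c' := by simpa using List.of_mem_filter hyf
      rw [hk]; exact hlt c' hc'
    by_cases hx : key x = c
    · -- x lands at the end of the front bucket
      have h1 : ∀ y ∈ ys.filter (fun z => key z == c), (decide (key y < key x)) = false := by
        intro y hy
        have hk : key y = c := by simpa using List.of_mem_filter hy
        simp [hk, hx]
      have h2 : ∀ y ∈ cs'.flatMap (fun c' => ys.filter (fun z => key z == c')),
          (decide (key y < key x)) = true := by
        intro y hy
        have := hmemkey y hy
        simp [hx]; omega
      rw [List.flatMap_cons, List.flatMap_cons,
        insertBy_append_of_not_before _ _ _ _ h1,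
        insertBy_of_forall_before _ _ _ h2]
      have hfront : (ys ++ [x]).filter (fun z => key z == c)
          = ys.filter (fun z => key z == c) ++ [x] := by
        simp [List.filter_append, hx]
      rw [hfront]
      have hrest : cs'.flatMap (fun c' => (ys ++ [x]).filter (fun z => key z == c'))
          = cs'.flatMap (fun c' => ys.filter (fun z => key z == c')) := by
        apply List.flatMap_congr
        intro c' hc'
        have : key x ≠ c' := by have := hlt c' hc'; omega
        simp [List.filter_append, this]
      rw [hrest]
      simp
    · -- x belongs to a later bucket
      have hm' : key x ∈ cs' := by
        rcases List.mem_cons.mp hm with h | h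
        · exact absurd h hx
        · exact h
      have hxc : key x < c := hlt _ hm'
      have h1 : ∀ y ∈ ys.filter (fun z => key z == c), (decide (key y < key x)) = false := by
        intro y hy
        have hk : key y = c := by simpa using List.of_mem_filter hy
        simp [hk]; omega
      rw [List.flatMap_cons, List.flatMap_cons,
        insertBy_append_of_not_before _ _ _ _ h1, ih hp' hm']
      have hfront : (ys ++ [x]).filter (fun z => key z == c)
          = ys.filter (fun z => key z == c) := by
        simp [List.filter_append, hx]
      rw [hfront]

-- Python's stable descending sort IS the bucket concatenation, for keys drawn from a
-- strictly decreasing list of candidate values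
lemma sorted_rev_eq_flatMap_filter {α : Type} (key : α → Int) (xs : List α) (cs : List Int)
    (hp : cs.Pairwise (fun a b => b < a)) (hm : ∀ x ∈ xs, key x ∈ cs) :
    PySem.List.sorted xs key true = cs.flatMap (fun c => xs.filter (fun x => key x == c)) := by
  induction xs using List.reverseRecOn with
  | nil => simp [PySem.List.sorted]
  | append_singleton ys x ih =>
    have hsnoc : PySem.List.sorted (ys ++ [x]) key true
        = PySem.List.insertBy (fun a b => decide (key b < key a)) x
            (PySem.List.sorted ys key true) := by
      simp [PySem.List.sorted, List.foldl_append]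
    rw [hsnoc, ih (fun y hy => hm y (by simp [hy])),
      insertBy_flatMap_filter key x ys cs hp (hm x (by simp))]

lemma pyGet?_map {α β : Type} (f : α → β) (xs : List α) (i : Int) :
    PySem.List.pyGet? (xs.map f) i = (PySem.List.pyGet? xs i).map f := by
  simp only [PySem.List.pyGet?, PySem.List.pyIdx?, List.length_map]
  cases h : (PySem.List.pyIdx? xs.length i) with
  | none => simp [PySem.List.pyIdx?] at h ⊢
  | some m => simp [PySem.List.pyIdx?] at h ⊢

-- range(n, 0, -1) = [n, n-1, …, 1]
lemma pyRange_desc (n : Nat) :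
    PySem.List.pyRange (n : Int) 0 (-1)
      = (List.range n).map (fun j : Nat => (n : Int) - (j : Int)) := by
  simp only [PySem.List.pyRange]
  by_cases hn : (0:Int) < n
  · simp only [if_neg (by norm_num : ¬ (-1:Int) = 0), if_neg (by norm_num : ¬ (0:Int) < -1),
      if_pos hn]
    have h1 : (((n:Int) - 0 + -(-1) - 1) / -(-1)).toNat = n := by norm_num
    rw [h1]
    apply List.map_congr_left
    intro j hj
    ring
  · have h0 : n = 0 := by omega
    subst h0
    norm_num

-- the two ports agree on every input (out of range, both return the "" sentinel)
lemma kth_order_eq_alt (text : String) (k : Int) :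
    kth_order text k = kth_order_alt text k := by
  simp only [kth_order, kth_order_alt]
  set cs := text.toList with hcs
  rw [A_dict_eq_counter]
  have hfreq : (cs.foldl (fun d c => d.modify c 0 (· + 1)) PySem.Dict.empty)
      = PySem.Dict.counter cs := rfl
  rw [hfreq]
  set items := (PySem.Dict.counter cs).items with hitems
  set descs := (List.range cs.length).map (fun j : Nat => (cs.length : Int) - (j : Int))
    with hdescs
  -- the descending candidate counts are strictly decreasing
  have hp : descs.Pairwise (fun a b => b < a) := by
    rw [hdescs, List.pairwise_map]
    exact List.pairwise_lt_range.imp (by intro a b h; omega)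
  -- every frequency lies among the candidates
  have hm : ∀ p ∈ items, p.2 ∈ descs := by
    intro p hp'
    rw [hitems, PySem.Dict.items_counter] at hp'
    rcases List.mem_map.mp hp' with ⟨c, hc, rfl⟩
    have hcin : c ∈ cs := (PySem.Set.mem_ofList _ _).mp hc
    have h1 : 1 ≤ cs.count c := List.count_pos_iff.mpr hcin
    have h2 : cs.count c ≤ cs.length := List.count_le_length
    rw [hdescs]
    refine List.mem_map.mpr ⟨cs.length - (cs.count c), List.mem_range.mpr (by omega), by omega⟩
  -- B's buckets read back the per-count filters of the items
  have hbucket : ∀ c : Int,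
      (items.foldl (fun b p => b.modify p.2 [] (· ++ [p.1])) PySem.Dict.empty).getD c []
        = (items.filter (fun p => p.2 == c)).map (fun p => p.1) := by
    intro c
    have hswap : items.foldl (fun b p => b.modify p.2 [] (· ++ [p.1])) PySem.Dict.empty
        = (items.map (fun p => (p.2, p.1))).foldl
            (fun b q => b.modify q.1 [] (· ++ [q.2])) PySem.Dict.empty := by
      rw [List.foldl_map]
    rw [hswap, PySem.Dict.getD_foldl_modify_append]
    simp [PySem.Dict.getD_empty, List.filter_map, List.map_map, Function.comp_def]
  -- B's result list is the first components of A's sorted item list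
  have hlen : PySem.List.len cs = (cs.length : Int) := by simp [PySem.List.len]
  have hresult :
      (PySem.List.pyRange (PySem.List.len cs) 0 (-1)).foldl
        (fun acc cnt => acc ++
          (items.foldl (fun b p => b.modify p.2 [] (· ++ [p.1])) PySem.Dict.empty).getD cnt []) []
      = (PySem.List.sorted items (fun p => p.2) true).map (fun p => p.1) := by
    rw [hlen, pyRange_desc, PySem.List.foldl_append_eq_flatMap,
      sorted_rev_eq_flatMap_filter (fun p => p.2) items descs hp hm]
    rw [List.map_flatMap]
    simp only [List.nil_append]
    exact List.flatMap_congr (fun c _ => hbucket c)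
  rw [hresult, pyGet?_map]
  cases PySem.List.pyGet? (PySem.List.sorted items (fun p => p.2) true) (k - 1) with
  | none => rfl
  | some p => rfl

-- ===== VERDICT (by name: the statement is the Claim_ definition above) =====
theorem kth_order_spec : Claim_equal_kth_order := by
  intro text k _ _
  unfold Spec_kth_order
  exact kth_order_eq_alt text k
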